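-- pv_equiv track=rewrite | github.com/Debabrata-alt/Python-Exercises | List_exercises/104.py | func
-- ===== SOURCE A (Python) =====
-- def func(inp_list):
--   max_len = max(len(el) for el in inp_list)
--   for el in inp_list:
--     len_el = len(el)
--     if len_el < max_len:
--       index = inp_list.index(el)
--       diff = max_len - len_el
--       el += diff * [0]
--       inp_list[index] = el
--
--   return [sum(el) for el in zip(*inp_list)]
-- ===== SOURCE B (Python) =====
-- def func(inp_list):
--     max_len = max(map(len, inp_list))
--     return [sum(el[i] for el in inp_list if i < len(el)) for i in range(max_len)]
-- ===== Notes on version B (the rewrite author's own statement) =====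
-- stated objective: alternative
-- what changed: B computes each column sum directly in one pass per column over the original sublists (summing el[i] for sublists long enough), removing A's inp_list.index scans and its in-place zero-padding; B does not mutate its argument.
import Mathlib
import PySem

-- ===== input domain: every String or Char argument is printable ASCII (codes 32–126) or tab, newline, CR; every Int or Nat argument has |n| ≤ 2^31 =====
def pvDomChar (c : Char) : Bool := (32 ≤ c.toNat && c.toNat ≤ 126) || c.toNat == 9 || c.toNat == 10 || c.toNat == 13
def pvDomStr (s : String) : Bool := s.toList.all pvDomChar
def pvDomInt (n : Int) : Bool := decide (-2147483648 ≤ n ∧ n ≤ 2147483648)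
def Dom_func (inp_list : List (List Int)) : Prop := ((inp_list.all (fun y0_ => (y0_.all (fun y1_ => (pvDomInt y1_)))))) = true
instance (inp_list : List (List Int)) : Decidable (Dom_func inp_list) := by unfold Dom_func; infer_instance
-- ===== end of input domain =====

-- B replaces A's index()-and-pad mutation loop by direct column sums over the original
-- sublists (alternative algorithm, same result); NOTE: A mutates inp_list in place (pads
-- its sublists), B does not — the equivalence proved here is about the RETURN value only.

-- ===== PORT A =====
-- the 'for el in inp_list' loop: i is the iterator position; el += diff*[0] mutates the
-- object at position i, then inp_list[index] = el overwrites position index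
def funcLoop (maxLen : Nat) (l : List (List Int)) (i : Nat) : List (List Int) :=
  if h : i < l.length then
    let el := l[i]
    if el.length < maxLen then
      let idx := (PySem.List.index? l el).getD 0   -- list.index(el); always finds el since el ∈ l
      let el' := el ++ List.replicate (maxLen - el.length) 0
      funcLoop maxLen ((l.set i el').set idx el') (i + 1)
    else funcLoop maxLen l (i + 1)
  else l
termination_by l.length - i
decreasing_by all_goals first
  | (simp [List.length_set]; omega)
  | omega

-- zip(*final) truncates at the shortest sublist
def funcZipLen : List (List Int) → Nat
  | [] => 0
  | x :: xs => xs.foldl (fun m el => min m el.length) x.length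

def func (inp_list : List (List Int)) : List Int :=
  match PySem.List.max? (inp_list.map (fun el => (el.length : Int))) (fun x => x) with
  | none => []   -- Python: max() of empty raises ValueError; excluded by Pre_func
  | some m =>
    let maxLen := m.toNat
    let final := funcLoop maxLen inp_list 0
    (List.range (funcZipLen final)).map (fun i => (final.map (fun el => el.getD i 0)).sum)

-- ===== PORT B =====
def func_alt (inp_list : List (List Int)) : List Int :=
  match PySem.List.max? (inp_list.map List.length) (fun x => x) with
  | none => []   -- Python: max() of empty raises ValueError; excluded by Pre_func
  | some maxLen =>
    (List.range maxLen).map (fun i =>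
      inp_list.foldl (fun s el => if i < el.length then s + el.getD i 0 else s) 0)

-- ===== PRECONDITION & SPEC =====
-- Pre_ excludes exactly the empty outer list, on which A raises ValueError (max of empty sequence)
def Pre_func (inp_list : List (List Int)) : Prop := inp_list ≠ []
instance (inp_list : List (List Int)) : Decidable (Pre_func inp_list) := by unfold Pre_func; infer_instance
def pvWitness_func : List (List Int) := [[1, 2], [3]]

def Spec_func (inp_list : List (List Int)) (out : List Int) : Prop := out = func_alt inp_list
instance (inp_list : List (List Int)) (out : List Int) : Decidable (Spec_func inp_list out) := by unfold Spec_func; infer_instance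

-- ===== CLAIM (what is proved, stated in full; the proofs are below) =====
def Claim_equal_func : Prop := ∀ (inp_list : List (List Int)), Dom_func inp_list → Pre_func inp_list → Spec_func inp_list (func inp_list)

-- ===== LEMMAS AND PROOFS =====

def pvPad (M : Nat) (x : List Int) : List Int := x ++ List.replicate (M - x.length) 0

theorem pvPad_length {M : Nat} {x : List Int} (h : x.length ≤ M) : (pvPad M x).length = M := by
  simp [pvPad]; omega

theorem pvPad_getD (M : Nat) (x : List Int) (i : Nat) :
    (pvPad M x).getD i 0 = if i < x.length then x.getD i 0 else 0 := by
  simp only [pvPad, List.getD_eq_getElem?_getD, List.getElem?_append, List.getElem?_replicate]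
  split_ifs <;> simp_all

theorem funcLoop_inv (M : Nat) (orig : List (List Int)) (hM : ∀ x ∈ orig, x.length ≤ M) :
    ∀ i l, l = (orig.map (pvPad M)).take i ++ orig.drop i →
    funcLoop M l i = orig.map (pvPad M) := by
  intro i
  induction' hw : orig.length - i using Nat.strong_induction_on with k IH generalizing i
  intro l hl
  by_cases hi : i < orig.length
  · -- decompose orig at i
    obtain ⟨el, hel⟩ : ∃ el, orig[i]'hi = el := ⟨_, rfl⟩
    have hlen : l.length = orig.length := by
      subst hl; simp; omega
    have hpre : ((orig.map (pvPad M)).take i).length = i := by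
      simp; omega
    have hdrop : orig.drop i = el :: orig.drop (i + 1) := by
      rw [List.drop_eq_getElem_cons hi, hel]
    have hgeti : l[i]'(by omega) = el := by
      subst hl
      rw [List.getElem_append_right (by omega)]
      simp [hpre, hdrop]
    have helmem : el ∈ orig := hel ▸ List.getElem_mem hi
    have helM : el.length ≤ M := hM el helmem
    -- the next-state list in both branches
    have hnext : (orig.map (pvPad M)).take (i + 1) ++ orig.drop (i + 1)
        = (orig.map (pvPad M)).take i ++ pvPad M el :: orig.drop (i + 1) := by
      rw [List.take_add_one]
      simp [hi, hel]
    rw [funcLoop]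
    have hil : i < l.length := by omega
    simp only [hil, dif_pos]
    rw [hgeti]
    by_cases hsh : el.length < M
    · simp only [hsh, if_pos]
      -- index? l el = some i
      have hidx : PySem.List.index? l el = some i := by
        rw [PySem.List.index?_eq_some_iff]
        refine ⟨(orig.map (pvPad M)).take i, orig.drop (i + 1), ?_, hpre, ?_⟩
        · rw [hl, hdrop]
        · intro hmem
          have hmem' := List.take_subset _ _ hmem
          obtain ⟨y, hy, rfl⟩ := List.mem_map.mp hmem'
          have : (pvPad M y).length = M := pvPad_length (hM y hy)
          omega
      rw [hidx]
      simp only [Option.getD_some, List.set_set]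
      refine IH (orig.length - (i + 1)) (by omega) (i + 1) rfl _ ?_
      have hset : (((orig.map (pvPad M)).take i) ++ el :: orig.drop (i + 1)).set i
          (el ++ List.replicate (M - el.length) 0)
          = ((orig.map (pvPad M)).take i) ++ pvPad M el :: orig.drop (i + 1) := by
        rw [List.set_append_right _ _ (by omega)]
        simp [hpre, pvPad]
      rw [hl, hdrop, hset, ← hnext]
    · simp only [hsh, if_false]
      refine IH (orig.length - (i + 1)) (by omega) (i + 1) rfl _ ?_
      have hpe : pvPad M el = el := by
        have : el.length = M := by omega
        simp [pvPad, this]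
      rw [hnext, hpe, hl, hdrop]
  · -- i ≥ length: loop ends, l is already fully padded
    have hlen : l.length = orig.length := by subst hl; simp; omega
    rw [funcLoop]
    simp only [show ¬ i < l.length by omega, dif_neg, not_false_iff]
    subst hl
    rw [List.take_of_length_le (by simp; omega), List.drop_of_length_le (by omega)]
    simp

theorem funcZipLen_const (M : Nat) (l : List (List Int)) (hne : l ≠ [])
    (h : ∀ x ∈ l, x.length = M) : funcZipLen l = M := by
  cases l with
  | nil => exact absurd rfl hne
  | cons x xs =>
    simp only [funcZipLen]
    have hx : x.length = M := h x (by simp)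
    rw [hx]
    clear hne hx
    induction xs with
    | nil => rfl
    | cons y ys ih =>
      simp only [List.foldl_cons]
      rw [h y (by simp), min_self]
      exact ih (fun z hz => h z (by simp at hz ⊢; tauto))

theorem col_sum_eq (i : Nat) (l : List (List Int)) (a : Int) :
    l.foldl (fun s el => if i < el.length then s + el.getD i 0 else s) a
      = a + (l.map (fun el => if i < el.length then el.getD i 0 else 0)).sum := by
  induction l generalizing a with
  | nil => simp
  | cons x xs ih =>
    simp only [List.foldl_cons, List.map_cons, List.sum_cons, ih]
    split_ifs <;> ring

theorem cast_foldl_max (xs : List (List Int)) (a : Nat) :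
    (xs.map (fun el => (el.length : Int))).foldl max (a : Int)
      = ((xs.map List.length).foldl max a : Nat) := by
  induction xs generalizing a with
  | nil => simp
  | cons x t ih => simp only [List.map_cons, List.foldl_cons, ← Nat.cast_max, ih]

-- ===== VERDICT (by name: the statement is the Claim_ definition above) =====
theorem func_spec : Claim_equal_func := by
  intro inp_list _ hpre
  unfold Spec_func func func_alt
  cases inp_list with
  | nil => exact absurd rfl hpre
  | cons x xs =>
    rw [List.map_cons, List.map_cons]
    set M := (xs.map List.length).foldl max x.length with hMdef
    have hB : PySem.List.max? (x.length :: xs.map List.length) (fun y => y) = some M := by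
      rw [hMdef]; exact PySem.List.max?_id_cons x.length (xs.map List.length)
    have hA : PySem.List.max? ((x.length : Int) :: xs.map (fun el => (el.length : Int)))
        (fun y => y) = some (M : Int) := by
      rw [hMdef, PySem.List.max?_id_cons, cast_foldl_max]
    rw [hA, hB]
    simp only [Int.toNat_natCast]
    have hM : ∀ y ∈ x :: xs, y.length ≤ M := by
      intro y hy
      have hmem : y.length ∈ x.length :: xs.map List.length := by
        rcases List.mem_cons.mp hy with rfl | h
        · exact List.mem_cons_self
        · exact List.mem_cons_of_mem _ (List.mem_map.mpr ⟨y, h, rfl⟩)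
      simpa using PySem.List.max?_isMax hB y.length hmem
    have hloop : funcLoop M (x :: xs) 0 = (x :: xs).map (pvPad M) :=
      funcLoop_inv M (x :: xs) hM 0 (x :: xs) (by simp)
    rw [hloop]
    have hzl : funcZipLen ((x :: xs).map (pvPad M)) = M := by
      apply funcZipLen_const
      · simp
      · intro z hz
        obtain ⟨y, hy, rfl⟩ := List.mem_map.mp hz
        exact pvPad_length (hM y hy)
    rw [hzl]
    apply List.map_congr_left
    intro i _
    rw [col_sum_eq, zero_add, List.map_map]
    congr 1
    apply List.map_congr_left
    intro y _
    simpa [List.getD_eq_getElem?_getD] using pvPad_getD M y i
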